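-- pv_equiv track=rewrite | github.com/ErgastiAlex/CodeSimilarity | Task03646/A/s007442432.py | f
-- ===== SOURCE A (Python) =====
-- def f(k):
--     n = 50
--     a = [k//n + n-1] * n
--     for i in range(k%n):
--         for j in range(n):
--             if i == j:
--                 a[j] += n
--             else:
--                 a[j] -= 1
--     return a
-- ===== SOURCE B (Python) =====
-- def f(k):
--     n = 50
--     base = k // n + n - 1
--     m = k % n
--     return [base + n - (m - 1) if j < m else base - m for j in range(n)]
-- ===== Notes on version B (the rewrite author's own statement) =====
-- stated objective: simpler
-- what changed: Replaced A's nested i/j update loops by a closed form: compute base=k//n+n-1 and m=k%n once and build each element directly (a hit value for indices below m, base-m otherwise) in a single comprehension.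
import Mathlib
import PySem

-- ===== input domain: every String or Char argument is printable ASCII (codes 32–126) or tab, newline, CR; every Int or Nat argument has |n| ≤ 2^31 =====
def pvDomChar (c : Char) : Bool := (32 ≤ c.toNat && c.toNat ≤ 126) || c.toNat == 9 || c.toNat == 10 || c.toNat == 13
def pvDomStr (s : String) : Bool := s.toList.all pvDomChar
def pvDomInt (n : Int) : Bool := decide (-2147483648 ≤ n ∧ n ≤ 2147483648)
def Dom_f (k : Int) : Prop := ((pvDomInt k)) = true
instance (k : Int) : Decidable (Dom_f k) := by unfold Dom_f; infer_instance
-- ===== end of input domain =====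

-- B replaces A's nested i/j update loops by a closed-form per-index formula (simpler, one pass).

-- ===== PORT A =====
-- inner 'for j in range(n)' body of A
def fInner (i : Int) (a : List Int) : List Int :=
  (PySem.List.pyRange 0 50 1).foldl (fun a j =>
    if i == j then PySem.List.pySetD a j (PySem.List.pyGetD a j 0 + 50)
    else PySem.List.pySetD a j (PySem.List.pyGetD a j 0 - 1)) a

def f (k : Int) : List Int :=
  let n : Int := 50
  let a := List.replicate 50 (PySem.Int.floordiv k n + n - 1)
  (PySem.List.pyRange 0 (PySem.Int.mod k n) 1).foldl (fun a i => fInner i a) a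

-- ===== PORT B =====
def f_alt (k : Int) : List Int :=
  let n : Int := 50
  let base := PySem.Int.floordiv k n + n - 1
  let m := PySem.Int.mod k n
  (PySem.List.pyRange 0 n 1).map (fun j => if j < m then base + n - (m - 1) else base - m)

-- ===== PRECONDITION & SPEC =====
def Spec_f (k : Int) (out : List Int) : Prop := out = f_alt k
instance (k : Int) (out : List Int) : Decidable (Spec_f k out) := by unfold Spec_f; infer_instance

-- ===== CLAIM (what is proved, stated in full; the proofs are below) =====
def Claim_equal_f : Prop := ∀ (k : Int), Dom_f k → Spec_f k (f k)

-- ===== LEMMAS AND PROOFS =====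

-- A's loops starting from the all-zero array
def loop0 (m : Int) : List Int :=
  (PySem.List.pyRange 0 m 1).foldl (fun a i => fInner i a) (List.replicate 50 0)

-- foldl commutes with a map g when every step does
theorem pv_foldl_hom_mem {α β : Type} (g : β → β) (s1 s2 : β → α → β) (L : List α)
    (h : ∀ b : β, ∀ x ∈ L, s1 (g b) x = g (s2 b x)) (init : β) :
    L.foldl s1 (g init) = g (L.foldl s2 init) := by
  induction L generalizing init with
  | nil => rfl
  | cons x xs ih =>
    simp only [List.foldl_cons]
    rw [h init x (by simp), ih (fun b y hy => h b y (by simp [hy]))]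

-- one set-update step commutes with uniformly shifting the array
theorem pv_step_shift (a : List Int) (j d c : Int) (hj : 0 ≤ j) :
    PySem.List.pySetD (a.map (· + c)) j (PySem.List.pyGetD (a.map (· + c)) j 0 + d)
      = (PySem.List.pySetD a j (PySem.List.pyGetD a j 0 + d)).map (· + c) := by
  rw [PySem.List.pySetD_of_nonneg _ _ hj, PySem.List.pySetD_of_nonneg _ _ hj]
  by_cases hlt : j.toNat < a.length
  · rw [PySem.List.pyGetD_eq_getElem _ _ hj (by simp only [List.length_map]; omega),
        PySem.List.pyGetD_eq_getElem _ _ hj (by omega)]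
    simp only [List.getElem_map]
    have e : a[j.toNat] + c + d = a[j.toNat] + d + c := by ring
    rw [e, ← List.map_set]
  · rw [List.set_eq_of_length_le (by simpa using not_lt.mp hlt),
        List.set_eq_of_length_le (le_of_not_gt hlt)]

theorem pv_fInner_shift (i c : Int) (a : List Int) :
    fInner i (a.map (· + c)) = (fInner i a).map (· + c) := by
  unfold fInner
  refine pv_foldl_hom_mem (g := fun l => l.map (· + c)) _ _ _ ?_ a
  intro b j hj
  have h0 : 0 ≤ j := ((PySem.List.mem_pyRange_one).mp hj).1
  by_cases h : i == j <;> simp only [h, if_pos, Bool.false_eq_true] <;>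
    exact pv_step_shift b j _ c h0

theorem pv_loop_shift (m c : Int) :
    (PySem.List.pyRange 0 m 1).foldl (fun a i => fInner i a)
        ((List.replicate 50 0).map (· + c))
      = (loop0 m).map (· + c) := by
  unfold loop0
  apply pv_foldl_hom_mem (fun l => l.map (· + c)) (fun a i => fInner i a)
    (fun a i => fInner i a)
  exact fun b i _ => pv_fInner_shift i c b

set_option maxRecDepth 100000 in
set_option maxHeartbeats 4000000 in
theorem pv_key : ∀ t : Fin 50,
    loop0 (t.val : Int) =
      (PySem.List.pyRange 0 50 1).map
        (fun j => if j < (t.val : Int) then 50 - ((t.val : Int) - 1) else -(t.val : Int)) := by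
  decide

-- ===== VERDICT (by name: the statement is the Claim_ definition above) =====
theorem f_spec : Claim_equal_f := by
  intro k _
  unfold Spec_f f f_alt
  set q := PySem.Int.floordiv k 50 with hq
  set m := PySem.Int.mod k 50 with hm
  have hm0 : 0 ≤ m := PySem.Int.mod_nonneg k (by norm_num)
  have hm50 : m < 50 := PySem.Int.mod_lt k (by norm_num)
  have hrep : List.replicate 50 (q + 50 - 1) = (List.replicate 50 (0:Int)).map (· + (q + 49)) := by
    simp only [List.map_replicate, Int.zero_add]; congr 1; omega
  simp only
  rw [hrep, pv_loop_shift m (q + 49)]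
  have ht : m = ((⟨m.toNat, by omega⟩ : Fin 50).val : Int) := by simp; omega
  rw [ht, pv_key ⟨m.toNat, by omega⟩]
  rw [List.map_map]
  apply List.map_congr_left
  intro j _
  have hmt : ((m.toNat : Int)) = m := Int.toNat_of_nonneg hm0
  simp only [Function.comp, hmt]
  split_ifs <;> ring
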